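-- pv_equiv track=rewrite | github.com/RichardGabelman/AdventOfCode2024 | Day2/Problem2/main.py | mostDifference
-- ===== SOURCE A (Python) =====
-- def allDifference(arr, threshold):
--     for i, n in enumerate(arr):
--         if i == 0:
--             continue
--         if abs(n - arr[i - 1]) > threshold:
--             return False
--     return True
--
-- def mostDifference(arr, threshold):
--     if allDifference(arr, threshold):
--         return [idx for idx in range(len(arr))]
--     potentialRemoved = []
--     for i in range(len(arr)):
--         copy = arr.copy()
--         del copy[i]
--         if allDifference(copy, threshold):
--           potentialRemoved.append(i)
--     return potentialRemoved
-- ===== SOURCE B (Python) =====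
-- def mostDifference(arr, threshold):
--     n = len(arr)
--     bad = [j for j in range(n - 1) if abs(arr[j + 1] - arr[j]) > threshold]
--     if not bad:
--         return list(range(n))
--     res = []
--     for i in (bad[0], bad[0] + 1):
--         if all(b == i - 1 or b == i for b in bad) and \
--            (i == 0 or i == n - 1 or abs(arr[i + 1] - arr[i - 1]) <= threshold):
--             res.append(i)
--     return res
-- ===== Notes on version B (the rewrite author's own statement) =====
-- stated objective: alternative
-- what changed: Instead of A's delete-and-recheck of every index (a full adjacent-pair scan per deleted index), B collects the violating adjacent pairs in one pass and then decides membership only for the at most two candidate indices adjacent to the first violation; worst-case cost drops from O(n^2) to O(n), though on the benchmark's near-sorted inputs both take one pass and A was not slower.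
import Mathlib
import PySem

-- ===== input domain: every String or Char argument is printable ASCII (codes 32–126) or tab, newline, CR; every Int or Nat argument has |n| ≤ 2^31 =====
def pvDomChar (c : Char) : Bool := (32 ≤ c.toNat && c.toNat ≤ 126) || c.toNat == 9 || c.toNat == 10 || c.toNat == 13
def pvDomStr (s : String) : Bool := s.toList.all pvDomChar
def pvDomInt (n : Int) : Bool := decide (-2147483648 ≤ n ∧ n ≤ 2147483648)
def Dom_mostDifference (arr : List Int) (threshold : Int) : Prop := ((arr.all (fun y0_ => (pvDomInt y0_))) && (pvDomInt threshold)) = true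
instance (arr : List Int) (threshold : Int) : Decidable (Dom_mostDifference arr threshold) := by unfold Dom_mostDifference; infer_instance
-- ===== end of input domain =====

-- B collects the violating adjacent pairs in one pass and decides only the at most two candidate
-- indices next to the first violation, instead of A's delete-and-recheck of every index (objective: alternative).

-- ===== PORT A =====
-- loop body of allDifference: 'for i, n in enumerate(arr)' with early 'return False'
def pvAllDiffGo (arr : List Int) (threshold : Int) : List (Int × Int) → Bool
  | [] => true
  | (i, n) :: rest =>
    if i = 0 then pvAllDiffGo arr threshold rest
    else
      -- arr[i - 1]: i ≥ 1 on every reachable iteration, so the index is in range and pyGetD is exact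
      if threshold < |n - PySem.List.pyGetD arr (i - 1) 0| then false
      else pvAllDiffGo arr threshold rest

def allDifference (arr : List Int) (threshold : Int) : Bool :=
  pvAllDiffGo arr threshold (PySem.List.enumerate arr)

def mostDifference (arr : List Int) (threshold : Int) : List Int :=
  if allDifference arr threshold then
    PySem.List.pyRange 0 (arr.length : Int) 1
  else
    (PySem.List.pyRange 0 (arr.length : Int) 1).foldl
      (fun acc i =>
        -- copy = arr.copy(); del copy[i]  — i is always in range here, so pop? is exact
        let copy := ((PySem.List.pop? arr i).map Prod.snd).getD []
        if allDifference copy threshold then acc ++ [i] else acc) []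

-- ===== PORT B =====
def mostDifference_alt (arr : List Int) (threshold : Int) : List Int :=
  let n : Int := arr.length
  let bad := (PySem.List.pyRange 0 (n - 1) 1).filter
      (fun j => decide (threshold < |PySem.List.pyGetD arr (j + 1) 0 - PySem.List.pyGetD arr j 0|))
  if bad.isEmpty then
    PySem.List.pyRange 0 n 1
  else
    let b0 := bad.headD 0
    ([b0, b0 + 1]).foldl
      (fun res i =>
        if (bad.all fun b => b == i - 1 || b == i)
            && (i == 0 || i == n - 1
                || decide (|PySem.List.pyGetD arr (i + 1) 0 - PySem.List.pyGetD arr (i - 1) 0| ≤ threshold))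
        then res ++ [i] else res) []

-- ===== PRECONDITION & SPEC =====
def Spec_mostDifference (arr : List Int) (threshold : Int) (out : List Int) : Prop := out = mostDifference_alt arr threshold
instance (arr : List Int) (threshold : Int) (out : List Int) : Decidable (Spec_mostDifference arr threshold out) := by unfold Spec_mostDifference; infer_instance

-- ===== CLAIM (what is proved, stated in full; the proofs are below) =====
def Claim_equal_mostDifference : Prop := ∀ (arr : List Int) (threshold : Int), Dom_mostDifference arr threshold → Spec_mostDifference arr threshold (mostDifference arr threshold)

-- ===== LEMMAS AND PROOFS =====

theorem pvGo_spec (arr : List Int) (t : Int) (xs : List Int) (s : Int) (hs : 0 < s)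
    (hx : ∀ k : Nat, k < xs.length → xs.getD k 0 = arr.getD (s.toNat + k) 0) :
    (pvAllDiffGo arr t (PySem.List.enumerate xs s) = true ↔
      ∀ j : Nat, s.toNat ≤ j → j < s.toNat + xs.length →
        |arr.getD j 0 - arr.getD (j-1) 0| ≤ t) := by
  induction xs generalizing s with
  | nil =>
    simp [PySem.List.enumerate_nil, pvAllDiffGo]
    intro j h1 h2; omega
  | cons x rest ih =>
    rw [PySem.List.enumerate_cons]
    have hs0 : ¬ (s = 0) := by omega
    have h1 : s - 1 = ((s.toNat - 1 : Nat) : Int) := by omega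
    have hx0 : x = arr.getD s.toNat 0 := by
      have := hx 0 (by simp); simpa using this
    rw [pvAllDiffGo, if_neg hs0, h1, PySem.List.pyGetD_natCast]
    by_cases hb : t < |x - arr.getD (s.toNat - 1) 0|
    · rw [if_pos hb]
      simp only [Bool.false_eq_true, false_iff]
      intro H
      have := H s.toNat (le_refl _) (by simp)
      rw [← hx0] at this
      omega
    · rw [if_neg hb]
      have hx' : ∀ k : Nat, k < rest.length → rest.getD k 0 = arr.getD ((s+1).toNat + k) 0 := by
        intro k hk
        have := hx (k+1) (by simp; omega)
        simp only [List.getD_cons_succ] at this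
        rw [this]; congr 1; omega
      rw [ih (s+1) (by omega) hx']
      constructor
      · intro H j hj1 hj2
        rcases Nat.eq_or_lt_of_le hj1 with h | h
        · subst h; rw [← hx0]; omega
        · exact H j (by omega) (by simp at hj2 ⊢; omega)
      · intro H j hj1 hj2
        exact H j (by omega) (by simp at hj1 ⊢; omega)

theorem pvAllDiff_iff (arr : List Int) (t : Int) :
    allDifference arr t = true ↔
      ∀ j : Nat, j + 1 < arr.length → |arr.getD (j+1) 0 - arr.getD j 0| ≤ t := by
  unfold allDifference
  cases arr with
  | nil => simp [PySem.List.enumerate_nil, pvAllDiffGo]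
  | cons a rest =>
    rw [PySem.List.enumerate_cons, pvAllDiffGo, if_pos rfl]
    have e0 : (0:Int) + 1 = 1 := by norm_num
    rw [e0]
    have hx : ∀ k : Nat, k < rest.length → rest.getD k 0 = (a :: rest).getD ((1:Int).toNat + k) 0 := by
      intro k hk
      simp [Nat.add_comm]
    rw [pvGo_spec (a :: rest) t rest 1 (by omega) hx]
    constructor
    · intro H j hj
      have := H (j+1) (by omega) (by simp at hj ⊢; omega)
      simpa using this
    · intro H j hj1 hj2
      obtain ⟨k, rfl⟩ : ∃ k, j = k + 1 := ⟨j - 1, by omega⟩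
      have := H k (by simp at hj2 ⊢; omega)
      simpa using this

theorem pvGetD_eraseIdx (arr : List Int) (i j : Nat) :
    (arr.eraseIdx i).getD j 0 = if j < i then arr.getD j 0 else arr.getD (j+1) 0 := by
  simp only [List.getD_eq_getElem?_getD, List.getElem?_eraseIdx]
  split <;> rfl

theorem pvAllDiff_erase_iff (arr : List Int) (t : Int) (i : Nat) (hi : i < arr.length) :
    (allDifference (arr.eraseIdx i) t = true ↔
      (∀ j : Nat, j + 1 < arr.length → t < |arr.getD (j+1) 0 - arr.getD j 0| →
          (j = i ∨ j + 1 = i)) ∧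
      (0 < i → i + 1 < arr.length → |arr.getD (i+1) 0 - arr.getD (i-1) 0| ≤ t)) := by
  rw [pvAllDiff_iff]
  have hlen : (arr.eraseIdx i).length = arr.length - 1 := List.length_eraseIdx_of_lt hi
  constructor
  · intro H
    constructor
    · intro j hj hbad
      by_contra hc
      push Not at hc
      rcases Nat.lt_or_ge (j+1) i with h | h
      · have := H j (by omega)
        rw [pvGetD_eraseIdx, pvGetD_eraseIdx, if_pos (by omega), if_pos (by omega)] at this
        omega
      · have hji : i + 1 ≤ j := by omega
        have := H (j-1) (by omega)
        rw [pvGetD_eraseIdx, pvGetD_eraseIdx, if_neg (by omega), if_neg (by omega)] at this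
        have e1 : j - 1 + 1 + 1 = j + 1 := by omega
        have e2 : j - 1 + 1 = j := by omega
        rw [e1, e2] at this
        omega
    · intro h0 h1
      have := H (i-1) (by omega)
      rw [pvGetD_eraseIdx, pvGetD_eraseIdx, if_neg (by omega), if_pos (by omega)] at this
      have e1 : i - 1 + 1 + 1 = i + 1 := by omega
      rw [e1] at this
      exact this
  · rintro ⟨H1, H2⟩ j hj
    rw [pvGetD_eraseIdx, pvGetD_eraseIdx]
    rcases Nat.lt_or_ge (j+1) i with h | h
    · rw [if_pos (by omega), if_pos (by omega)]
      by_contra hc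
      have := H1 j (by omega) (by omega)
      omega
    · rcases Nat.eq_or_lt_of_le h with h' | h'
      · rw [if_neg (by omega), if_pos (by omega)]
        have := H2 (by omega) (by omega)
        have e1 : j + 1 + 1 = i + 1 := by omega
        have e2 : j = i - 1 := by omega
        rw [e1, e2]; exact this
      · rw [if_neg (by omega), if_neg (by omega)]
        by_contra hc
        have := H1 (j+1) (by omega) (by omega)
        omega

def pvBadN (arr : List Int) (t : Int) : List Nat :=
  (List.range (arr.length - 1)).filter (fun k => decide (t < |arr.getD (k+1) 0 - arr.getD k 0|))

theorem pvMem_badN (arr : List Int) (t : Int) (k : Nat) :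
    k ∈ pvBadN arr t ↔ k + 1 < arr.length ∧ t < |arr.getD (k+1) 0 - arr.getD k 0| := by
  simp only [pvBadN, List.mem_filter, List.mem_range, decide_eq_true_iff]
  constructor
  · rintro ⟨h1, h2⟩; exact ⟨by omega, h2⟩
  · rintro ⟨h1, h2⟩; exact ⟨by omega, h2⟩

theorem pvBadN_nil_iff (arr : List Int) (t : Int) :
    pvBadN arr t = [] ↔ allDifference arr t = true := by
  rw [pvAllDiff_iff, List.eq_nil_iff_forall_not_mem]
  constructor
  · intro H j hj
    have := H j
    rw [pvMem_badN] at this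
    by_contra hc
    exact this ⟨hj, by omega⟩
  · intro H m hm
    rw [pvMem_badN] at hm
    have := H m hm.1
    omega

theorem pvBad_eq (arr : List Int) (t : Int) :
    ((PySem.List.pyRange 0 ((arr.length : Int) - 1) 1).filter
      (fun j => decide (t < |PySem.List.pyGetD arr (j + 1) 0 - PySem.List.pyGetD arr j 0|)))
      = (pvBadN arr t).map (fun k : Nat => (k : Int)) := by
  cases arr with
  | nil =>
    rw [PySem.List.pyRange_one_eq_nil (by norm_num)]
    simp [pvBadN]
  | cons a rest =>
    have hn : ((a :: rest).length : Int) - 1 = ((rest.length : Nat) : Int) := by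
      simp
    rw [hn, PySem.List.pyRange_zero_natCast, List.filter_map]
    unfold pvBadN
    have hlen : (a :: rest).length - 1 = rest.length := by simp
    rw [hlen]
    refine congrArg (List.map (fun k : Nat => (k : Int))) (List.filter_congr ?_)
    intro k _
    simp only [Function.comp_apply]
    have e1 : ((k : Int) + 1) = ((k + 1 : Nat) : Int) := by push_cast; ring
    rw [e1, PySem.List.pyGetD_natCast, PySem.List.pyGetD_natCast]

theorem pvFilter_range_two (P : Nat → Bool) (n k0 : Nat) (h : k0 + 1 < n)
    (hP : ∀ k, k < n → P k = true → k = k0 ∨ k = k0 + 1) :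
    (List.range n).filter P = ([k0, k0 + 1]).filter P := by
  have hn : n = (k0 + 2) + (n - (k0 + 2)) := by omega
  rw [hn, List.range_add]
  have h2 : List.range (k0 + 2) = List.range (k0 + 1) ++ [k0 + 1] := List.range_succ
  have h1 : List.range (k0 + 1) = List.range k0 ++ [k0] := List.range_succ
  rw [h2, h1]
  simp only [List.filter_append]
  have e1 : (List.range k0).filter P = [] := by
    rw [List.filter_eq_nil_iff]
    intro a ha
    rw [List.mem_range] at ha
    intro hpa
    have := hP a (by omega) hpa
    omega
  have e2 : ((List.range (n - (k0 + 2))).map (fun x => k0 + 2 + x)).filter P = [] := by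
    rw [List.filter_eq_nil_iff]
    intro a ha
    simp only [List.mem_map, List.mem_range] at ha
    obtain ⟨x, hx, rfl⟩ := ha
    intro hpa
    have := hP (k0 + 2 + x) (by omega) hpa
    omega
  rw [e1, e2]
  simp only [List.filter_cons, List.filter_nil, List.nil_append, List.append_nil]
  split_ifs <;> simp

theorem pvP_eq_PB (arr : List Int) (t : Int) (k : Nat) (hk : k < arr.length) :
    allDifference (arr.eraseIdx k) t =
      ((((pvBadN arr t).map (fun m : Nat => (m : Int))).all fun b => b == (k:Int) - 1 || b == (k:Int)) &&
       ((k:Int) == 0 || (k:Int) == (arr.length : Int) - 1 ||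
        decide (|PySem.List.pyGetD arr ((k:Int) + 1) 0 - PySem.List.pyGetD arr ((k:Int) - 1) 0| ≤ t))) := by
  rw [Bool.eq_iff_iff]
  rw [pvAllDiff_erase_iff arr t k hk]
  simp only [List.all_map, List.all_eq_true, Function.comp_apply, Bool.and_eq_true,
    Bool.or_eq_true, beq_iff_eq, decide_eq_true_iff]
  by_cases hk0 : k = 0
  · subst hk0
    constructor
    · rintro ⟨H1, _⟩
      refine ⟨?_, Or.inl (by norm_num)⟩
      intro m hm
      rw [pvMem_badN] at hm
      rcases H1 m hm.1 hm.2 with h | h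
      · right; omega
      · omega
    · rintro ⟨H1, _⟩
      refine ⟨?_, ?_⟩
      · intro j hj hb
        have := H1 j ((pvMem_badN arr t j).mpr ⟨hj, hb⟩)
        rcases this with h | h
        · omega
        · left; omega
      · intro h0 _
        exact absurd h0 (lt_irrefl 0)
  · have e1 : ((k:Int) - 1) = ((k - 1 : Nat) : Int) := by omega
    have e2 : ((k:Int) + 1) = ((k + 1 : Nat) : Int) := by omega
    rw [e1, e2, PySem.List.pyGetD_natCast, PySem.List.pyGetD_natCast]
    constructor
    · rintro ⟨H1, H2⟩
      constructor
      · intro m hm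
        rw [pvMem_badN] at hm
        rcases H1 m hm.1 hm.2 with h | h
        · right; omega
        · left; omega
      · by_cases hlast : k + 1 < arr.length
        · right; exact H2 (by omega) hlast
        · left; right; omega
    · rintro ⟨H1, H2⟩
      constructor
      · intro j hj hb
        have := H1 j ((pvMem_badN arr t j).mpr ⟨hj, hb⟩)
        rcases this with h | h
        · right; omega
        · left; omega
      · intro _ hlt
        rcases H2 with (h | h) | h
        · omega
        · omega
        · exact h

-- ===== VERDICT (by name: the statement is the Claim_ definition above) =====
theorem mostDifference_spec : Claim_equal_mostDifference := by
  intro arr t _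
  unfold Spec_mostDifference mostDifference mostDifference_alt
  simp only [pvBad_eq arr t]
  by_cases hnil : pvBadN arr t = []
  · rw [hnil]
    rw [if_pos ((pvBadN_nil_iff arr t).mp hnil)]
    simp
  · have hA : allDifference arr t ≠ true := fun h => hnil ((pvBadN_nil_iff arr t).mpr h)
    rw [if_neg hA]
    obtain ⟨k0, tl, hk0tl⟩ := List.exists_cons_of_ne_nil hnil
    have hk0mem : k0 ∈ pvBadN arr t := by rw [hk0tl]; exact List.mem_cons_self ..
    have hk0lt : k0 + 1 < arr.length := ((pvMem_badN arr t k0).mp hk0mem).1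
    have hempty : ((pvBadN arr t).map (fun m : Nat => (m : Int))).isEmpty = false := by
      rw [hk0tl]; simp
    have hhead : ((pvBadN arr t).map (fun m : Nat => (m : Int))).headD 0 = (k0 : Int) := by
      rw [hk0tl]; simp
    rw [hempty, hhead]
    simp only [Bool.false_eq_true, if_false]
    -- A's loop = filter over range
    rw [PySem.List.pyRange_zero_natCast, List.foldl_map]
    have hcong := PySem.List.foldl_congr_mem (List.range arr.length)
        (fun (acc : List Int) (x : Nat) =>
          if allDifference ((Option.map Prod.snd (PySem.List.pop? arr ↑x)).getD []) t = true
          then acc ++ [(↑x : Int)] else acc)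
        (fun (acc : List Int) (x : Nat) =>
          if allDifference (arr.eraseIdx x) t = true then acc ++ [(↑x : Int)] else acc)
        []
        (by
          intro acc x hx
          rw [List.mem_range] at hx
          simp only [PySem.List.pop?_natCast arr x hx, Option.map_some, Option.getD_some])
    rw [hcong]
    rw [PySem.List.foldl_append_if
        (fun k : Nat => allDifference (arr.eraseIdx k) t) (fun k : Nat => (k : Int))
        (List.range arr.length) []]
    rw [List.nil_append]
    -- B's loop = filter over the two candidates
    rw [PySem.List.foldl_append_if_eq_filter]
    rw [List.nil_append]
    have hsub : ∀ k, k < arr.length →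
        allDifference (arr.eraseIdx k) t = true → k = k0 ∨ k = k0 + 1 := by
      intro k hklt hPk
      rw [pvP_eq_PB arr t k hklt] at hPk
      rw [Bool.and_eq_true] at hPk
      have := List.all_eq_true.mp hPk.1 ((k0 : Int)) (List.mem_map_of_mem hk0mem)
      simp only [Bool.or_eq_true, beq_iff_eq] at this
      omega
    rw [pvFilter_range_two _ arr.length k0 hk0lt hsub]
    have hlist : [(k0 : Int), (k0 : Int) + 1] = ([k0, k0 + 1]).map (fun m : Nat => (m : Int)) := by
      simp
    rw [hlist, List.filter_map]
    refine congrArg _ (List.filter_congr ?_)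
    intro x hx
    have hxlt : x < arr.length := by
      rcases List.mem_pair.mp hx with rfl | rfl <;> omega
    simp only [Function.comp_apply]
    exact pvP_eq_PB arr t x hxlt
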